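-- pv_equiv track=rewrite | github.com/pietrodll/coding-challenges | project-euler/problems/problem74.py | find_all_loops
-- ===== SOURCE A (Python) =====
-- import math
-- from typing import Generator, List, Set
--
-- def iter_digits(n: int) -> Generator[int, None, None]:
--     while n != 0:
--         yield n % 10
--         n = n // 10
--
-- def compute_digit_factorial_sum(n: int) -> int:
--     return sum(map(math.factorial, iter_digits(n)))
--
-- def find_all_loops(max_number: int) -> List[Set[int]]:
--     loops = [set() for _ in range(max_number + 1)]
--
--     for n in range(1, max_number + 1):
--         loop = {n}
--         nxt = compute_digit_factorial_sum(n)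
--
--         while nxt not in loop:
--             if nxt < len(loops) and len(loops[nxt]) > 0:
--                 loop |= loops[nxt]
--             else:
--                 loop.add(nxt)
--                 nxt = compute_digit_factorial_sum(nxt)
--
--         loops[n] = loop
--
--     return loops
-- ===== SOURCE B (Python) =====
-- FACT = [1, 1, 2, 6, 24, 120, 720, 5040, 40320, 362880]
--
--
-- def digit_factorial_sum(n):
--     total = 0
--     while n:
--         total += FACT[n % 10]
--         n //= 10
--     return total
--
--
-- def reach(n):
--     seen = {n}
--     nxt = digit_factorial_sum(n)
--     while nxt not in seen:
--         if nxt < n: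
--             seen |= reach(nxt)
--         else:
--             seen.add(nxt)
--             nxt = digit_factorial_sum(nxt)
--     return seen
--
--
-- def find_all_loops(max_number):
--     return [reach(n) if n else set() for n in range(max_number + 1)]
-- ===== Notes on version B (the rewrite author's own statement) =====
-- stated objective: simpler
-- what changed: Replaced A's bottom-up dynamic-programming table (a pre-allocated list filled in place, with an explicit length/non-emptiness test to reuse earlier entries) by a self-contained recursive function that recomputes the reachable set of a smaller start on demand, and replaced the math.factorial-over-generator digit sum by a single loop over a precomputed 0-9 factorial table; the result list is a comprehension instead of index assignments.
import Mathlib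
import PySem

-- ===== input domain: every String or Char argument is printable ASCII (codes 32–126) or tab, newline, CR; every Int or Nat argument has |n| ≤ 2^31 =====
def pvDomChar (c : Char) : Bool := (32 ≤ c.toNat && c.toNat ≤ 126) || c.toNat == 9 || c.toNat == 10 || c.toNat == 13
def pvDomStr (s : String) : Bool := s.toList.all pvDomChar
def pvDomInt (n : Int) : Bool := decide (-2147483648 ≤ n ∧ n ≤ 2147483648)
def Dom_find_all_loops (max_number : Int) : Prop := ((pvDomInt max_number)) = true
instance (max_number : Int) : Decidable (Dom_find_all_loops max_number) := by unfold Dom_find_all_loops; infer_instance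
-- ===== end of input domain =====

set_option maxRecDepth 4000


-- B replaces A's dynamic-programming table (pre-allocated list, in-place assignment,
-- lookups of earlier entries) by plain recursion that recomputes smaller chains on demand
-- (no table; not faster).  Program equivalence is about the RETURN value; neither version
-- mutates its argument.

-- ===== PORT A =====
-- math.factorial (library call, ported as the corresponding Lean function)
def pyFactorial (n : Int) : Int := (Nat.factorial n.toNat : Int)

-- iter_digits: while n != 0: yield n % 10; n //= 10.
-- Fuel n.natAbs + 1 is ample for every n ≥ 0 (A only applies it to positive ints).
def iterDigits : Nat → Int → List Int
  | 0, _ => []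
  | fuel + 1, n =>
      if n ≠ 0 then PySem.Int.mod n 10 :: iterDigits fuel (PySem.Int.floordiv n 10) else []

def compute_digit_factorial_sum (n : Int) : Int :=
  ((iterDigits (n.natAbs + 1) n).map pyFactorial).sum

-- the inner while loop of A (fuel guard only; ample for every chain on Dom).
-- 'loops[nxt]' via pyGet?/getD: exact whenever -len ≤ nxt, and nxt ≥ 1 on every reachable call.
def faWhile : Nat → List (List Int) → PySem.Set Int → Int → PySem.Set Int
  | 0, _, loop, _ => loop
  | fuel + 1, loops, loop, nxt =>
      if nxt ∈ loop then loop
      else if nxt < (loops.length : Int) ∧ ((PySem.List.pyGet? loops nxt).getD []).length > 0 then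
        faWhile fuel loops (PySem.Set.union loop ((PySem.List.pyGet? loops nxt).getD [])) nxt
      else faWhile fuel loops (PySem.Set.add loop nxt) (compute_digit_factorial_sum nxt)

def find_all_loops (max_number : Int) : List (List Int) :=
  let loops : List (List Int) :=
    (PySem.List.pyRange 0 (max_number + 1) 1).map (fun _ => (PySem.Set.empty : PySem.Set Int))
  (PySem.List.pyRange 1 (max_number + 1) 1).foldl
    (fun loops n =>
      let loop : PySem.Set Int := PySem.Set.ofList [n]
      let nxt := compute_digit_factorial_sum n
      loops.set n.toNat (faWhile (n.natAbs + 3628820) loops loop nxt))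
    loops

-- ===== PORT B =====
def fact_table : List Int := [1, 1, 2, 6, 24, 120, 720, 5040, 40320, 362880]

-- total = 0; while n: total += FACT[n % 10]; n //= 10   (fuel guard, ample for n >= 0)
def dfsAux : Nat → Int → Int → Int
  | 0, _, total => total
  | fuel + 1, n, total =>
      if n ≠ 0 then
        dfsAux fuel (PySem.Int.floordiv n 10)
          (total + (PySem.List.pyGet? fact_table (PySem.Int.mod n 10)).getD 0)
      else total

def digit_factorial_sum (n : Int) : Int := dfsAux (n.natAbs + 1) n 0

-- the while loop of B's reach; the recursive call reach(nxt) is ported with the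
-- remaining fuel as its budget (a fuel guard only; ample for every chain on Dom)
def reachAux : Nat → Int → PySem.Set Int → Int → PySem.Set Int
  | 0, _, seen, _ => seen
  | fuel + 1, n, seen, nxt =>
      if nxt ∈ seen then seen
      else if nxt < n then
        reachAux fuel n
          (PySem.Set.union seen
            (reachAux fuel nxt (PySem.Set.ofList [nxt]) (digit_factorial_sum nxt))) nxt
      else reachAux fuel n (PySem.Set.add seen nxt) (digit_factorial_sum nxt)

def reach (n : Int) : PySem.Set Int :=
  reachAux ((n.natAbs + 1) * 3628810) n (PySem.Set.ofList [n]) (digit_factorial_sum n)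

def find_all_loops_alt (max_number : Int) : List (List Int) :=
  (PySem.List.pyRange 0 (max_number + 1) 1).map
    (fun n => if n ≠ 0 then reach n else (PySem.Set.empty : PySem.Set Int))

-- ===== PRECONDITION & SPEC =====
def Spec_find_all_loops (max_number : Int) (out : List (List Int)) : Prop := out = find_all_loops_alt max_number
instance (max_number : Int) (out : List (List Int)) : Decidable (Spec_find_all_loops max_number out) := by unfold Spec_find_all_loops; infer_instance

-- ===== CLAIM (what is proved, stated in full; the proofs are below) =====
def Claim_equal_find_all_loops : Prop := ∀ (max_number : Int), Dom_find_all_loops max_number → Spec_find_all_loops max_number (find_all_loops max_number)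

-- ===== LEMMAS AND PROOFS =====

-- canonical walk: the list of NEW elements emitted by the while loop from state (S, v)
def owalk : Nat → List Int → Int → List Int
  | 0, _, _ => []
  | fuel + 1, S, v => if v ∈ S then [] else v :: owalk fuel (S ++ [v]) (digit_factorial_sum v)

-- C is a digit-factorial-sum chain whose last element maps to v
def ChainInto : List Int → Int → Prop
  | [], _ => True
  | [a], v => digit_factorial_sum a = v
  | a :: b :: r, v => digit_factorial_sum a = b ∧ ChainInto (b :: r) v

theorem tab_eq (n : Int) :
    (PySem.List.pyGet? fact_table (PySem.Int.mod n 10)).getD 0 = pyFactorial (PySem.Int.mod n 10) := by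
  rw [PySem.Int.mod_eq_emod_of_pos (by norm_num)]
  have h0 : 0 ≤ n % 10 := Int.emod_nonneg n (by norm_num)
  have h1 : n % 10 < 10 := Int.emod_lt_of_pos n (by norm_num)
  interval_cases h : (n % 10) <;> decide

theorem dfs_step (fuel : Nat) : ∀ (n t : Int),
    dfsAux fuel n t = t + ((iterDigits fuel n).map pyFactorial).sum := by
  induction fuel with
  | zero => intro n t; simp [dfsAux, iterDigits]
  | succ fuel ih =>
    intro n t
    by_cases h : n = 0
    · simp [dfsAux, iterDigits, h]
    · simp only [dfsAux, iterDigits, if_pos h, ih, tab_eq, List.map_cons, List.sum_cons]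
      ring

theorem cdfs_eq_dfs (n : Int) : compute_digit_factorial_sum n = digit_factorial_sum n := by
  simp [compute_digit_factorial_sum, digit_factorial_sum, dfs_step]

theorem tab_bounds (n : Int) :
    1 ≤ (PySem.List.pyGet? fact_table (PySem.Int.mod n 10)).getD 0 ∧
    (PySem.List.pyGet? fact_table (PySem.Int.mod n 10)).getD 0 ≤ 362880 := by
  rw [PySem.Int.mod_eq_emod_of_pos (by norm_num)]
  have h0 : 0 ≤ n % 10 := Int.emod_nonneg n (by norm_num)
  have h1 : n % 10 < 10 := Int.emod_lt_of_pos n (by norm_num)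
  interval_cases h : (n % 10) <;> exact ⟨by decide, by decide⟩

theorem dfs_mono (fuel : Nat) : ∀ (n t : Int), 0 ≤ n → t ≤ dfsAux fuel n t := by
  induction fuel with
  | zero => intro n t _; simp [dfsAux]
  | succ fuel ih =>
    intro n t hn
    by_cases h : n = 0
    · simp [dfsAux, h]
    · simp only [dfsAux, if_pos h]
      have h10 : PySem.Int.floordiv n 10 = n / 10 := PySem.Int.floordiv_eq_ediv_of_pos (by norm_num)
      have := ih (PySem.Int.floordiv n 10) (t + (PySem.List.pyGet? fact_table (PySem.Int.mod n 10)).getD 0) (by rw [h10]; omega)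
      have hb := (tab_bounds n).1
      omega

theorem dfs_upper (k : Nat) : ∀ (fuel : Nat) (n t : Int), 0 ≤ n → n < 10 ^ k →
    dfsAux fuel n t ≤ t + 362880 * k := by
  induction k with
  | zero =>
    intro fuel n t hn hk
    have : n = 0 := by omega
    subst this
    cases fuel <;> simp [dfsAux]
  | succ k ih =>
    intro fuel n t hn hk
    cases fuel with
    | zero => simp [dfsAux]; positivity
    | succ fuel =>
      by_cases h : n = 0
      · simp [dfsAux, h]; positivity
      · simp only [dfsAux, if_pos h]
        have h10 : PySem.Int.floordiv n 10 = n / 10 := PySem.Int.floordiv_eq_ediv_of_pos (by norm_num)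
        have hpow : (10:Int) ^ (k+1) = 10 ^ k * 10 := by ring
        have hlt : n / 10 < 10 ^ k := by
          rw [hpow] at hk; omega
        have := ih fuel (PySem.Int.floordiv n 10) (t + (PySem.List.pyGet? fact_table (PySem.Int.mod n 10)).getD 0) (by rw [h10]; omega) (by rw [h10]; exact hlt)
        have hb := (tab_bounds n).2
        push_cast at this ⊢
        omega

theorem f_bound (v : Int) (h1 : 1 ≤ v) (h2 : v ≤ 2147483648) :
    1 ≤ digit_factorial_sum v ∧ digit_factorial_sum v ≤ 3628800 := by
  constructor
  · show (1:Int) ≤ dfsAux (v.natAbs + 1) v 0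
    have hv : v ≠ 0 := by omega
    simp only [dfsAux, if_pos hv] at *
    have h10 : PySem.Int.floordiv v 10 = v / 10 := PySem.Int.floordiv_eq_ediv_of_pos (by norm_num)
    have := dfs_mono v.natAbs (PySem.Int.floordiv v 10) (0 + (PySem.List.pyGet? fact_table (PySem.Int.mod v 10)).getD 0) (by rw [h10]; omega)
    have hb := (tab_bounds v).1
    omega
  · have := dfs_upper 10 (v.natAbs + 1) v 0 (by omega) (by norm_num; omega)
    simpa [digit_factorial_sum] using this

theorem owalk_nodup (fuel : Nat) : ∀ (S : List Int) (v : Int), S.Nodup →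
    (S ++ owalk fuel S v).Nodup := by
  induction fuel with
  | zero => intro S v h; simpa [owalk]
  | succ fuel ih =>
    intro S v h
    by_cases hv : v ∈ S
    · simpa [owalk, hv]
    · have := ih (S ++ [v]) (digit_factorial_sum v)
        (by rw [List.nodup_append]; refine ⟨h, List.nodup_singleton v, ?_⟩; intro a ha b hb; rcases List.mem_singleton.mp hb; intro hab; exact hv (hab ▸ ha))
      simpa [owalk, hv, List.append_assoc] using this

theorem chain_snoc : ∀ (C : List Int) (v : Int), ChainInto C v →
    ChainInto (C ++ [v]) (digit_factorial_sum v)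
  | [], v, _ => by simp [ChainInto]
  | [a], v, h => ⟨h, rfl⟩
  | a :: b :: r, v, h => by
      obtain ⟨h1, h2⟩ := h
      exact ⟨h1, chain_snoc (b :: r) v h2⟩

theorem chain_suffix : ∀ (pre D : List Int) (v : Int), ChainInto (pre ++ D) v → D ≠ [] →
    ChainInto D v
  | [], D, v, h, _ => h
  | a :: pre, D, v, h, hD => by
      apply chain_suffix pre D v _ hD
      have h2 : ChainInto (a :: (pre ++ D)) v := h
      cases hpd : pre ++ D with
      | nil => exact absurd (List.append_eq_nil_iff.mp hpd).2 hD
      | cons b r => rw [hpd] at h2; exact h2.2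

theorem owalk_cont : ∀ (D : List Int) (a v0 : Int) (E : List Int) (fuel : Nat),
    ChainInto (a :: D) v0 → (a :: D).Nodup →
    (∀ d ∈ a :: D, d ∉ E) → v0 ∈ E → D.length + 1 < fuel →
    owalk fuel E a = a :: D := by
  intro D
  induction D with
  | nil =>
    intro a v0 E fuel hch hnd hdisj hv0 hfuel
    match fuel, hfuel with
    | fuel + 2, _ =>
      have ha : a ∉ E := hdisj a (by simp)
      have hfa : digit_factorial_sum a = v0 := hch
      simp only [owalk, if_neg ha, hfa]
      have : v0 ∈ E ++ [a] := by simp [hv0]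
      simp [this]
  | cons b r ih =>
    intro a v0 E fuel hch hnd hdisj hv0 hfuel
    match fuel, hfuel with
    | fuel + 1, hfuel =>
      have ha : a ∉ E := hdisj a (by simp)
      obtain ⟨hfa, hch2⟩ := hch
      simp only [owalk, if_neg ha, hfa]
      congr 1
      apply ih b v0 (E ++ [a]) fuel hch2 hnd.of_cons
      · intro d hd
        simp only [List.mem_append, List.mem_singleton]
        push Not
        refine ⟨hdisj d (by simp [hd]), ?_⟩
        rintro rfl
        exact (List.nodup_cons.mp hnd).1 hd
      · simp [hv0]
      · simpa using hfuel

theorem owalk_split (U : Finset Int) (C : List Int) (v0 : Int)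
    (hU2 : ∀ x ∈ U, digit_factorial_sum x ∈ U)
    (hch : ChainInto C v0) (hndC : C.Nodup) (hCU : ∀ x ∈ C, x ∈ U) (hv0C : v0 ∉ C) :
    ∀ (fuelL : Nat) (E : List Int) (v : Int) (fuelR : Nat),
      E.Nodup → (∀ x ∈ E, x ∉ C) → (∀ x ∈ E, x ∈ U) →
      (v0 ∈ E ∨ (E = [] ∧ v = v0)) → v ∈ U →
      (U \ (C ++ E).toFinset).card < fuelL → (U \ E.toFinset).card < fuelR →
      owalk fuelL (C ++ E) v = (owalk fuelR E v).filter (fun x => decide (x ∉ C)) := by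
  intro fuelL
  induction fuelL with
  | zero => intro E v fuelR _ _ _ _ _ hL _; omega
  | succ fuelL ih =>
    intro E v fuelR hndE hEC hEU hv0E hvU hL hR
    obtain ⟨fr, rfl⟩ : ∃ m, fuelR = m + 1 := ⟨fuelR - 1, by omega⟩
    by_cases hvE : v ∈ E
    · have : v ∈ C ++ E := by simp [hvE]
      simp [owalk, this, hvE]
    · by_cases hvC : v ∈ C
      · have hvCE : v ∈ C ++ E := by simp [hvC]
        obtain ⟨pre, suf, rfl⟩ := List.append_of_mem hvC
        have hv0E2 : v0 ∈ E := by
          rcases hv0E with h | ⟨rfl, rfl⟩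
          · exact h
          · exact absurd hvC hv0C
        have hchs : ChainInto (v :: suf) v0 := chain_suffix pre (v :: suf) v0 hch (by simp)
        have hnds : (v :: suf).Nodup := (List.nodup_append.mp hndC).2.1
        have hsubC : ∀ x ∈ v :: suf, x ∈ pre ++ v :: suf := by intro x hx; simp [hx]
        have hdisj : ∀ d ∈ v :: suf, d ∉ E := by
          intro d hd hdE
          exact hEC d hdE (hsubC d hd)
        have hlen : suf.length + 1 < fr + 1 := by
          have hsub : (v :: suf).toFinset ⊆ U \ E.toFinset := by
            intro x hx
            rw [Finset.mem_sdiff]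
            rw [List.mem_toFinset] at hx
            exact ⟨hCU x (hsubC x hx), by rw [List.mem_toFinset]; exact hdisj x hx⟩
          have hcard := Finset.card_le_card hsub
          rw [List.toFinset_card_of_nodup hnds] at hcard
          simp only [List.length_cons] at hcard
          omega
        rw [owalk_cont suf v v0 E (fr + 1) hchs hnds hdisj hv0E2 hlen]
        have hfilt : (v :: suf).filter (fun x => decide (x ∉ pre ++ v :: suf)) = [] := by
          apply List.filter_eq_nil_iff.mpr
          intro a ha
          simp only [decide_not, Bool.not_eq_true', decide_eq_false_iff_not, Decidable.not_not]
          exact hsubC a ha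
        rw [hfilt]
        simp [owalk, hvCE]
      · have hvCE : v ∉ C ++ E := by simp [hvC, hvE]
        simp only [owalk, if_neg hvCE, if_neg hvE, List.filter_cons]
        have hkeep : (decide (v ∉ C)) = true := by simpa using hvC
        rw [hkeep]
        simp only [if_pos rfl]
        congr 1
        have hassoc : (C ++ E) ++ [v] = C ++ (E ++ [v]) := by simp
        rw [hassoc]
        apply ih (E ++ [v]) (digit_factorial_sum v) fr
        · rw [List.nodup_append]
          refine ⟨hndE, List.nodup_singleton v, ?_⟩
          intro a ha b hb; rcases List.mem_singleton.mp hb; intro hab; exact hvE (hab ▸ ha)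
        · intro x hx
          rcases List.mem_append.mp hx with h | h
          · exact hEC x h
          · rw [List.mem_singleton] at h; exact h ▸ hvC
        · intro x hx
          rcases List.mem_append.mp hx with h | h
          · exact hEU x h
          · rw [List.mem_singleton] at h; exact h ▸ hvU
        · left
          rcases hv0E with h | ⟨rfl, rfl⟩
          · simp [h]
          · simp
        · exact hU2 v hvU
        · have : (U \ (C ++ (E ++ [v])).toFinset).card < (U \ (C ++ E).toFinset).card := by
            apply Finset.card_lt_card
            constructor
            · intro x hx
              rw [Finset.mem_sdiff] at hx ⊢
              refine ⟨hx.1, ?_⟩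
              intro hmem
              exact hx.2 (by simp only [List.toFinset_append] at hmem ⊢; rw [Finset.mem_union] at hmem ⊢; simp only [Finset.mem_union] at hmem ⊢; tauto)
            · intro hsub
              have hv1 : v ∈ U \ (C ++ E).toFinset := by
                rw [Finset.mem_sdiff, List.mem_toFinset]
                exact ⟨hvU, hvCE⟩
              have := hsub hv1
              rw [Finset.mem_sdiff, List.mem_toFinset] at this
              exact this.2 (by simp)
          omega
        · have : (U \ (E ++ [v]).toFinset).card < (U \ E.toFinset).card := by
            apply Finset.card_lt_card
            constructor
            · intro x hx
              rw [Finset.mem_sdiff] at hx ⊢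
              refine ⟨hx.1, ?_⟩
              intro hmem
              exact hx.2 (by simp only [List.toFinset_append] at hmem ⊢; simp at hmem ⊢; tauto)
            · intro hsub
              have hv1 : v ∈ U \ E.toFinset := by
                rw [Finset.mem_sdiff, List.mem_toFinset]
                exact ⟨hvU, hvE⟩
              have := hsub hv1
              rw [Finset.mem_sdiff, List.mem_toFinset] at this
              exact this.2 (by simp)
          omega

theorem card_step (U : Finset Int) (L : List Int) (v : Int) (hvU : v ∈ U) (hvL : v ∉ L) :
    (U \ (L ++ [v]).toFinset).card + 1 = (U \ L.toFinset).card := by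
  have heq : U \ (L ++ [v]).toFinset = (U \ L.toFinset).erase v := by
    ext x
    simp only [Finset.mem_sdiff, Finset.mem_erase, List.mem_toFinset, List.mem_append,
      List.mem_singleton]
    tauto
  have hvmem : v ∈ U \ L.toFinset := by
    rw [Finset.mem_sdiff, List.mem_toFinset]; exact ⟨hvU, hvL⟩
  rw [heq, Finset.card_erase_of_mem hvmem]
  have := Finset.card_pos.mpr ⟨v, hvmem⟩
  omega

-- canonical reachable set (proof layer)
def reachable (v : Int) : List Int := owalk (v.natAbs + 3628821) [] v

theorem reachable_eq_owalk (v : Int) : reachable v = owalk (v.natAbs + 3628821) [] v := rfl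

theorem reachable_unfold (v : Int) :
    reachable v = v :: owalk (v.natAbs + 3628820) [v] (digit_factorial_sum v) := by
  have hn : v.natAbs + 3628821 = v.natAbs + 3628820 + 1 := by omega
  have hmem : v ∉ ([] : List Int) := List.not_mem_nil
  rw [reachable, hn, owalk, if_neg hmem]
  rfl

theorem reachable_nodup (v : Int) : (reachable v).Nodup := by
  have h := owalk_nodup (v.natAbs + 3628821) [] v List.nodup_nil
  rw [List.nil_append] at h
  rw [reachable_eq_owalk]
  exact h

theorem mem_reachable_self (v : Int) : v ∈ reachable v := by
  rw [reachable_unfold]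
  simp

theorem faWhile_eq (U : Finset Int) (T : List (List Int))
    (hU1 : ∀ x ∈ U, 1 ≤ x ∧ x ≤ 2147483648)
    (hU2 : ∀ x ∈ U, digit_factorial_sum x ∈ U)
    (hUcard : U.card ≤ 3628801)
    (hT : ∀ i : Int, 1 ≤ i → ((PySem.List.pyGet? T i).getD []) ≠ [] →
          ((PySem.List.pyGet? T i).getD []) = reachable i) :
    ∀ (fuel : Nat) (C : List Int) (v : Int) (fuelO : Nat),
      C ≠ [] → ChainInto C v → C.Nodup → (∀ x ∈ C, x ∈ U) → v ∈ U →
      (U \ C.toFinset).card + 1 < fuel → (U \ C.toFinset).card < fuelO →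
      faWhile fuel T C v = C ++ owalk fuelO C v := by
  intro fuel
  induction fuel with
  | zero => intro C v fuelO _ _ _ _ _ hf _; omega
  | succ fuel ih =>
    intro C v fuelO hCne hch hnd hCU hvU hf hfO
    obtain ⟨fo, rfl⟩ : ∃ m, fuelO = m + 1 := ⟨fuelO - 1, by omega⟩
    by_cases hvC : v ∈ C
    · simp [faWhile, owalk, hvC]
    · simp only [faWhile, if_neg hvC]
      by_cases hmemo : v < (T.length : Int) ∧ ((PySem.List.pyGet? T v).getD []).length > 0
      · rw [if_pos hmemo]
        have hv1 : 1 ≤ v := (hU1 v hvU).1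
        have hs : (PySem.List.pyGet? T v).getD [] = reachable v :=
          hT v hv1 (by intro hnil; rw [hnil] at hmemo; simp at hmemo)
        rw [hs]
        -- the merged set equals continuing the walk with C pre-seeded
        have hsplit : owalk (fo + 1) C v
            = (owalk (v.natAbs + 3628821) [] v).filter (fun x => decide (x ∉ C)) := by
          have := owalk_split U C v hU2 hch hnd hCU hvC (fo + 1) [] v (v.natAbs + 3628821)
            (List.nodup_nil) (by simp) (by simp) (Or.inr ⟨rfl, rfl⟩) hvU
            (by simpa using hfO) (by simp; omega)
          simpa using this
        have hunion : PySem.Set.union C (reachable v) = C ++ owalk (fo + 1) C v := by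
          show PySem.Set.update C (reachable v) = _
          rw [PySem.Set.update_eq_append_filter,
            PySem.Set.ofList_eq_self_of_nodup _ (reachable_nodup v), hsplit, reachable_eq_owalk]
          congr 1
          apply List.filter_congr
          intro x _
          by_cases hx : x ∈ C <;> simp [hx, PySem.Set.contains]
        rw [hunion]
        obtain ⟨g, rfl⟩ : ∃ m, fuel = m + 1 := ⟨fuel - 1, by omega⟩
        have hvin : v ∈ C ++ owalk (fo + 1) C v := by
          rw [← hunion]
          rw [PySem.Set.mem_union]
          exact Or.inr (mem_reachable_self v)
        simp [faWhile, hvin]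
      · rw [if_neg hmemo, cdfs_eq_dfs, PySem.Set.add_of_not_mem hvC]
        have hcard := card_step U C v hvU hvC
        have hstep := ih (C ++ [v]) (digit_factorial_sum v) fo (by simp)
          (chain_snoc C v hch)
          (by rw [List.nodup_append]; refine ⟨hnd, List.nodup_singleton v, ?_⟩; intro a ha b hb; rcases List.mem_singleton.mp hb; intro hab; exact hvC (hab ▸ ha))
          (by intro x hx; rcases List.mem_append.mp hx with h | h
              · exact hCU x h
              · rw [List.mem_singleton] at h; exact h ▸ hvU)
          (hU2 v hvU) (by omega) (by omega)
        rw [hstep]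
        simp only [owalk, if_neg hvC]
        simp

theorem inner_eq (T : List (List Int)) (n : Int) (h1 : 1 ≤ n) (h2 : n ≤ 2147483648)
    (hT : ∀ i : Int, 1 ≤ i → ((PySem.List.pyGet? T i).getD []) ≠ [] →
          ((PySem.List.pyGet? T i).getD []) = reachable i) :
    faWhile (n.natAbs + 3628820) T (PySem.Set.ofList [n]) (compute_digit_factorial_sum n)
      = reachable n := by
  have hofl : (PySem.Set.ofList [n] : List Int) = [n] := rfl
  set U : Finset Int := insert n (Finset.Icc (1:Int) 3628800) with hU
  have hU1 : ∀ x ∈ U, 1 ≤ x ∧ x ≤ 2147483648 := by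
    intro x hx
    rcases Finset.mem_insert.mp hx with rfl | hx
    · exact ⟨h1, h2⟩
    · rw [Finset.mem_Icc] at hx; omega
  have hU2 : ∀ x ∈ U, digit_factorial_sum x ∈ U := by
    intro x hx
    have hb := f_bound x (hU1 x hx).1 (hU1 x hx).2
    exact Finset.mem_insert_of_mem (Finset.mem_Icc.mpr ⟨hb.1, hb.2⟩)
  have hUcard : U.card ≤ 3628801 := by
    rw [hU]
    have h1c := Finset.card_insert_le n (Finset.Icc (1:Int) 3628800)
    have h2c : (Finset.Icc (1:Int) 3628800).card = 3628800 := by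
      rw [Int.card_Icc]
      decide
    omega
  have hcardsub : (U \ ([n] : List Int).toFinset).card ≤ 3628801 := by
    have := Finset.card_le_card (Finset.sdiff_subset (s := U) (t := ([n] : List Int).toFinset))
    omega
  rw [cdfs_eq_dfs, hofl]
  rw [faWhile_eq U T hU1 hU2 hUcard hT (n.natAbs + 3628820) [n] (digit_factorial_sum n)
      (n.natAbs + 3628820) (by simp) rfl (List.nodup_singleton n)
      (by intro x hx; rw [List.mem_singleton] at hx; exact hx ▸ Finset.mem_insert_self n _)
      (hU2 n (Finset.mem_insert_self n _)) (by omega) (by omega)]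
  rw [reachable_unfold]
  rfl

-- B-side analogue of faWhile_eq: the recursive reach walk in canonical form.
-- Outer induction on a bound k for n (justifying the recursive calls at smaller n),
-- inner induction on the loop fuel.
theorem reachAux_eq : ∀ (k : Nat) (n : Int) (U : Finset Int), 1 ≤ n → n.natAbs ≤ k →
    (∀ x ∈ U, 1 ≤ x ∧ x ≤ 2147483648) → (∀ x ∈ U, digit_factorial_sum x ∈ U) →
    U.card ≤ 3628801 →
    ∀ (fuel : Nat) (C : List Int) (v : Int) (fuelO : Nat),
      C ≠ [] → ChainInto C v → C.Nodup → (∀ x ∈ C, x ∈ U) → v ∈ U →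
      n.natAbs * 3628810 + (U \ C.toFinset).card + 2 ≤ fuel →
      (U \ C.toFinset).card < fuelO →
      reachAux fuel n C v = C ++ owalk fuelO C v := by
  intro k
  induction k with
  | zero => intro n U h1 hk; exact absurd hk (by omega)
  | succ k ihk =>
    intro n U h1 hk hU1 hU2 hUcard fuel
    induction fuel with
    | zero => intro C v fuelO _ _ _ _ _ hf _; omega
    | succ fuel ih =>
      intro C v fuelO hCne hch hnd hCU hvU hf hfO
      obtain ⟨fo, rfl⟩ : ∃ m, fuelO = m + 1 := ⟨fuelO - 1, by omega⟩
      by_cases hvC : v ∈ C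
      · simp [reachAux, owalk, hvC]
      · simp only [reachAux, if_neg hvC]
        by_cases hmemo : v < n
        · rw [if_pos hmemo]
          have hv1 : 1 ≤ v := (hU1 v hvU).1
          have hv2 : v ≤ 2147483648 := (hU1 v hvU).2
          -- the inner recursive call, through the induction on k
          set V : Finset Int := insert v (Finset.Icc (1:Int) 3628800) with hV
          have hV1 : ∀ x ∈ V, 1 ≤ x ∧ x ≤ 2147483648 := by
            intro x hx
            rcases Finset.mem_insert.mp hx with rfl | hx
            · exact ⟨hv1, hv2⟩
            · rw [Finset.mem_Icc] at hx; omega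
          have hV2 : ∀ x ∈ V, digit_factorial_sum x ∈ V := by
            intro x hx
            have hb := f_bound x (hV1 x hx).1 (hV1 x hx).2
            exact Finset.mem_insert_of_mem (Finset.mem_Icc.mpr ⟨hb.1, hb.2⟩)
          have hVcard : V.card ≤ 3628801 := by
            rw [hV]
            have h1c := Finset.card_insert_le v (Finset.Icc (1:Int) 3628800)
            have h2c : (Finset.Icc (1:Int) 3628800).card = 3628800 := by
              rw [Int.card_Icc]
              decide
            omega
          have hVsub : (V \ ([v] : List Int).toFinset).card ≤ 3628801 := by
            have := Finset.card_le_card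
              (Finset.sdiff_subset (s := V) (t := ([v] : List Int).toFinset))
            omega
          have hvabs : v.natAbs < n.natAbs := by omega
          have hofl : (PySem.Set.ofList [v] : PySem.Set Int) = [v] := rfl
          have hkin : v.natAbs ≤ k := by omega
          have hfuelin : v.natAbs * 3628810 + (V \ ([v] : List Int).toFinset).card + 2 ≤ fuel := by
            have hmul : (v.natAbs + 1) * 3628810 ≤ n.natAbs * 3628810 :=
              Nat.mul_le_mul_right _ (by omega)
            rw [add_mul, one_mul] at hmul
            linarith
          have hfoin : (V \ ([v] : List Int).toFinset).card < v.natAbs + 3628820 := by omega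
          have hs : reachAux fuel v (PySem.Set.ofList [v]) (digit_factorial_sum v)
              = reachable v := by
            rw [hofl,
              ihk v V hv1 hkin hV1 hV2 hVcard fuel [v] (digit_factorial_sum v)
                (v.natAbs + 3628820) (by simp) rfl (List.nodup_singleton v)
                (by intro x hx; rw [List.mem_singleton] at hx
                    exact hx ▸ Finset.mem_insert_self v _)
                (hV2 v (Finset.mem_insert_self v _)) hfuelin hfoin,
              reachable_unfold]
            rfl
          rw [hs]
          have hsplit : owalk (fo + 1) C v
              = (owalk (v.natAbs + 3628821) [] v).filter (fun x => decide (x ∉ C)) := by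
            have := owalk_split U C v hU2 hch hnd hCU hvC (fo + 1) [] v (v.natAbs + 3628821)
              (List.nodup_nil) (by simp) (by simp) (Or.inr ⟨rfl, rfl⟩) hvU
              (by simpa using hfO) (by simp; omega)
            simpa using this
          have hunion : PySem.Set.union C (reachable v) = C ++ owalk (fo + 1) C v := by
            show PySem.Set.update C (reachable v) = _
            rw [PySem.Set.update_eq_append_filter,
              PySem.Set.ofList_eq_self_of_nodup _ (reachable_nodup v), hsplit,
              reachable_eq_owalk]
            congr 1
            apply List.filter_congr
            intro x _
            by_cases hx : x ∈ C <;> simp [hx, PySem.Set.contains]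
          rw [hunion]
          obtain ⟨g, rfl⟩ : ∃ m, fuel = m + 1 := ⟨fuel - 1, by omega⟩
          have hvin : v ∈ C ++ owalk (fo + 1) C v := by
            rw [← hunion]
            rw [PySem.Set.mem_union]
            exact Or.inr (mem_reachable_self v)
          simp [reachAux, hvin]
        · rw [if_neg hmemo, PySem.Set.add_of_not_mem hvC]
          have hcard := card_step U C v hvU hvC
          have hstep := ih (C ++ [v]) (digit_factorial_sum v) fo (by simp)
            (chain_snoc C v hch)
            (by rw [List.nodup_append]
                refine ⟨hnd, List.nodup_singleton v, ?_⟩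
                intro a ha b hb; rcases List.mem_singleton.mp hb; intro hab
                exact hvC (hab ▸ ha))
            (by intro x hx; rcases List.mem_append.mp hx with h | h
                · exact hCU x h
                · rw [List.mem_singleton] at h; exact h ▸ hvU)
            (hU2 v hvU) (by linarith [hcard, hf]) (by omega)
          rw [hstep]
          simp only [owalk, if_neg hvC]
          simp

-- the entry point of B's recursion in canonical form
theorem reach_eq (n : Int) (h1 : 1 ≤ n) (h2 : n ≤ 2147483648) :
    reach n = reachable n := by
  have hofl : (PySem.Set.ofList [n] : PySem.Set Int) = [n] := rfl
  set U : Finset Int := insert n (Finset.Icc (1:Int) 3628800) with hU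
  have hU1 : ∀ x ∈ U, 1 ≤ x ∧ x ≤ 2147483648 := by
    intro x hx
    rcases Finset.mem_insert.mp hx with rfl | hx
    · exact ⟨h1, h2⟩
    · rw [Finset.mem_Icc] at hx; omega
  have hU2 : ∀ x ∈ U, digit_factorial_sum x ∈ U := by
    intro x hx
    have hb := f_bound x (hU1 x hx).1 (hU1 x hx).2
    exact Finset.mem_insert_of_mem (Finset.mem_Icc.mpr ⟨hb.1, hb.2⟩)
  have hUcard : U.card ≤ 3628801 := by
    rw [hU]
    have h1c := Finset.card_insert_le n (Finset.Icc (1:Int) 3628800)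
    have h2c : (Finset.Icc (1:Int) 3628800).card = 3628800 := by
      rw [Int.card_Icc]
      decide
    omega
  have hcardsub : (U \ ([n] : List Int).toFinset).card ≤ 3628801 := by
    have := Finset.card_le_card
      (Finset.sdiff_subset (s := U) (t := ([n] : List Int).toFinset))
    omega
  rw [reach, hofl,
    reachAux_eq n.natAbs n U h1 le_rfl hU1 hU2 hUcard ((n.natAbs + 1) * 3628810) [n]
      (digit_factorial_sum n) (n.natAbs + 3628820) (by simp) rfl (List.nodup_singleton n)
      (by intro x hx; rw [List.mem_singleton] at hx; exact hx ▸ Finset.mem_insert_self n _)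
      (hU2 n (Finset.mem_insert_self n _))
      (by rw [add_mul, one_mul]; linarith [hcardsub]) (by omega),
    reachable_unfold]
  rfl

-- table after processing 1..m
def tableR (mx m : Int) : List (List Int) :=
  (PySem.List.pyRange 0 (mx + 1) 1).map
    (fun i => if 1 ≤ i ∧ i ≤ m then reachable i else [])

theorem tableR_get (mx m i : Int) (h1 : 1 ≤ i)
    (hne : ((PySem.List.pyGet? (tableR mx m) i).getD []) ≠ []) :
    ((PySem.List.pyGet? (tableR mx m) i).getD []) = reachable i := by
  by_cases hlt : i < mx + 1
  · have h0i : (0:Int) ≤ i := by omega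
    have hget : PySem.List.pyGet? (tableR mx m) i
        = some (if 1 ≤ i ∧ i ≤ m then reachable i else []) := by
      rw [tableR, PySem.List.pyGet?_of_nonneg _ h0i, List.getElem?_map,
        List.getElem?_eq_getElem (by rw [PySem.List.length_pyRange_one]; omega),
        PySem.List.getElem_pyRange_one]
      simp only [Option.map_some, zero_add]
      have hcast : ((i.toNat : Nat) : Int) = i := by omega
      rw [hcast]
    rw [hget] at hne ⊢
    simp only [Option.getD_some] at hne ⊢
    by_cases hc : 1 ≤ i ∧ i ≤ m
    · rw [if_pos hc]
    · rw [if_neg hc] at hne; exact absurd rfl hne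
  · exfalso
    have hnone : PySem.List.pyGet? (tableR mx m) i = none := by
      rw [PySem.List.pyGet?_eq_none_iff]
      intro hin
      unfold PySem.Raise.InRange at hin
      have hlen : (tableR mx m).length = (mx + 1).toNat := by
        rw [tableR, List.length_map, PySem.List.length_pyRange_one]
        congr 1
        omega
      omega
    rw [hnone] at hne
    exact hne rfl

theorem tableR_set (mx m : Int) (h0 : 0 ≤ m) (hm : m + 1 ≤ mx) :
    (tableR mx m).set ((m + 1).toNat) (reachable (m + 1)) = tableR mx (m + 1) := by
  apply List.ext_getElem
  · simp [tableR]
  · intro k hk1 hk2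
    rw [List.getElem_set]
    simp only [tableR, List.length_map] at hk2
    simp only [tableR, List.getElem_map,
      PySem.List.getElem_pyRange_one (h := hk2), zero_add]
    by_cases hkm : (m + 1).toNat = k
    · rw [if_pos hkm]
      have hki : ((k : Nat) : Int) = m + 1 := by omega
      rw [hki, if_pos (by omega)]
    · rw [if_neg hkm]
      by_cases hc : 1 ≤ (k : Int) ∧ (k : Int) ≤ m
      · rw [if_pos hc, if_pos ⟨hc.1, by omega⟩]
      · rw [if_neg hc, if_neg (by intro hc2; exact hc ⟨hc2.1, by omega⟩)]

theorem tableR_init (mx : Int) :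
    ((PySem.List.pyRange 0 (mx + 1) 1).map (fun _ => (PySem.Set.empty : PySem.Set Int)))
      = tableR mx 0 := by
  rw [tableR]
  apply List.map_congr_left
  intro i hi
  rw [PySem.List.mem_pyRange_one] at hi
  rw [if_neg (by omega)]
  rfl

theorem fold_eq (mx : Int) (hmx : mx ≤ 2147483648) :
    ∀ (m : Int), 0 ≤ m → m ≤ mx →
    ((PySem.List.pyRange 1 (m + 1) 1).foldl
      (fun loops n =>
        loops.set n.toNat
          (faWhile (n.natAbs + 3628820) loops (PySem.Set.ofList [n])
            (compute_digit_factorial_sum n)))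
      (tableR mx 0)) = tableR mx m := by
  intro m h0
  induction m, h0 using Int.le_induction with
  | base =>
    intro _
    rw [PySem.List.pyRange_one_eq_nil (by omega)]
    rfl
  | succ m hm0 ih =>
    intro hm
    rw [PySem.List.pyRange_one_succ_right (by omega), List.foldl_append,
      ih (by omega)]
    simp only [List.foldl_cons, List.foldl_nil]
    rw [inner_eq (tableR mx m) (m + 1) (by omega) (by omega)
      (fun i hi hne => tableR_get mx m i hi hne)]
    exact tableR_set mx m hm0 (by omega)

theorem alt_eq_tableR (mx : Int) (hmx : mx ≤ 2147483648) :
    find_all_loops_alt mx = tableR mx mx := by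
  rw [find_all_loops_alt, tableR]
  apply List.map_congr_left
  intro i hi
  rw [PySem.List.mem_pyRange_one] at hi
  by_cases h : i = 0
  · rw [if_neg (by simpa using h), if_neg (by omega)]
    rfl
  · rw [if_pos h, if_pos ⟨by omega, by omega⟩]
    exact reach_eq i (by omega) (by omega)

-- ===== VERDICT (by name: the statement is the Claim_ definition above) =====
theorem find_all_loops_spec : Claim_equal_find_all_loops := by
  intro mx hdom
  have hmx : -2147483648 ≤ mx ∧ mx ≤ 2147483648 := by
    have := hdom
    unfold Dom_find_all_loops pvDomInt at this
    exact of_decide_eq_true this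
  show find_all_loops mx = find_all_loops_alt mx
  by_cases h0 : 0 ≤ mx
  · rw [find_all_loops, tableR_init mx, fold_eq mx hmx.2 mx h0 le_rfl, alt_eq_tableR mx hmx.2]
  · have hnil0 : PySem.List.pyRange 0 (mx + 1) 1 = [] := PySem.List.pyRange_one_eq_nil (by omega)
    have hnil1 : PySem.List.pyRange 1 (mx + 1) 1 = [] := PySem.List.pyRange_one_eq_nil (by omega)
    rw [find_all_loops, find_all_loops_alt, hnil0, hnil1]
    rfl
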